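-- pv_equiv track=rewrite | github.com/Neuromophic/eNAS_leanrable_selectable_LNC | NEAT_LNC_genome/feed_forward.py | feed_forward_layers
-- ===== SOURCE A (Python) =====
-- def required_for_output(inputs, outputs, connections):
--     required = set(outputs)
--     checked = set(outputs)
--     while True:
--         checking = set(a for (a, b) in connections if b in checked and a not in checked)
--
--         if not checking:
--             break
--         layer_nodes = set(x for x in checking if x not in inputs)
--
--         if not layer_nodes:
--             break
--
--         required = required.union(layer_nodes)
--         checked = checked.union(checking)
--
--     return required
--
-- def feed_forward_layers(inputs, outputs, connections):
--     required = required_for_output(inputs, outputs, connections)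
--
--     layers = []
--     checked = set(inputs)
--     while True:
--         candidate = set(
--             b for (a, b) in connections if a in checked and b not in checked)
--
--         collection = set()
--         for key in candidate:
--             if key in required and all(a in checked for (a, b) in connections if b == key):
--                 collection.add(key)
--
--         if not collection:
--             break
--
--         layers.append(collection)
--         checked = checked.union(collection)
--
--     return layers
-- ===== SOURCE B (Python) =====
-- def feed_forward_layers(inputs, outputs, connections):
--     # Alternative algorithm: precompute predecessor lists once; frontier-based reverse reachability
--     # for `required` and per-round single passes (no inner full-connection scan).
--     preds = {}
--     for (a, b) in connections:
--         preds.setdefault(b, []).append(a)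
--
--     # required: reverse BFS from the outputs along predecessor lists,
--     # mirroring A's stop rule (stop when a wave contains no non-input node).
--     required = set(outputs)
--     checked = set(outputs)
--     frontier = outputs
--     while True:
--         new = set()
--         for b in frontier:
--             for a in preds.get(b, ()):
--                 if a not in checked:
--                     new.add(a)
--         if not new:
--             break
--         fresh = {x for x in new if x not in inputs}
--         if not fresh:
--             break
--         required |= fresh
--         checked |= new
--         frontier = new
--
--     layers = []
--     checked = set(inputs)
--     while True:
--         layer = []
--         for (a, b) in connections:
--             if a in checked and b not in checked:
--                 if b not in layer and b in required and all(p in checked for p in preds.get(b, ())):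
--                     layer.append(b)
--         if not layer:
--             break
--         layers.append(set(layer))
--         checked.update(layer)
--     return layers
-- ===== Notes on version B (the rewrite author's own statement) =====
-- stated objective: alternative
-- what changed: Builds a predecessor-list dict once and uses it both for a frontier-based reverse BFS computing `required` and for an O(deg) readiness test per candidate in a single ordered pass per round, replacing A's repeated whole-connection rescans and the per-key `all(... for (a,b) in connections if b == key)` inner full scan.
import Mathlib
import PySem

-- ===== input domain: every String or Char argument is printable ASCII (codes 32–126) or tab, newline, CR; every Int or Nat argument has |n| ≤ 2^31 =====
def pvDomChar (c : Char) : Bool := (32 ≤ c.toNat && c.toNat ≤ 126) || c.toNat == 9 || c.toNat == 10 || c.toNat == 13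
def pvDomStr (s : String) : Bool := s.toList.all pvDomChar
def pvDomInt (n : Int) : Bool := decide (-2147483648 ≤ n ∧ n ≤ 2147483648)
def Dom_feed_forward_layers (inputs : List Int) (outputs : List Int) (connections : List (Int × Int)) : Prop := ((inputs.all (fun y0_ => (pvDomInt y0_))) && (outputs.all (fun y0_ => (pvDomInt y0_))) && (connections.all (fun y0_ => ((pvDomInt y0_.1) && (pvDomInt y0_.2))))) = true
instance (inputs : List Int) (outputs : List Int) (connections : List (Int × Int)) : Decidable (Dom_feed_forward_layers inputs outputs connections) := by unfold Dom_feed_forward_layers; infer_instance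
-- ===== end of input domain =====

-- B replaces A's repeated whole-connection rescans by a predecessor-list dict built once
-- (reverse BFS for `required`, per-candidate readiness tests against the precomputed
-- predecessor lists in one ordered pass per round); objective: alternative algorithm.
-- Both programs return a list of Python sets; set iteration order is never observable in either.

-- ===== PORT A =====
-- while-loops are ported with fuel `connections.length + 1`, which exceeds the number of
-- iterations either Python loop can perform (each non-final iteration adds at least one
-- distinct connection endpoint to `checked`), so the fuel branch is never the result.
def pvReqLoopA (inputs : List Int) (connections : List (Int × Int)) : Nat → PySem.Set Int → PySem.Set Int → PySem.Set Int
  | 0, required, _ => required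
  | fuel+1, required, checked =>
    let checking : PySem.Set Int :=
      PySem.Set.ofList ((connections.filter (fun p => decide (p.2 ∈ checked) && decide (p.1 ∉ checked))).map Prod.fst)
    if checking = [] then required
    else
      let layer_nodes : PySem.Set Int := PySem.Set.ofList (checking.filter (fun x => decide (x ∉ inputs)))
      if layer_nodes = [] then required
      else pvReqLoopA inputs connections fuel (PySem.Set.union required layer_nodes) (PySem.Set.union checked checking)

def pvLayersLoopA (connections : List (Int × Int)) (required : PySem.Set Int) : Nat → List (List Int) → PySem.Set Int → List (List Int)
  | 0, layers, _ => layers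
  | fuel+1, layers, checked =>
    let candidate : PySem.Set Int :=
      PySem.Set.ofList ((connections.filter (fun p => decide (p.1 ∈ checked) && decide (p.2 ∉ checked))).map Prod.snd)
    let collection : PySem.Set Int :=
      candidate.foldl (fun col key =>
        if key ∈ required ∧ ((connections.filter (fun p => p.2 == key)).all (fun p => decide (p.1 ∈ checked))) = true
        then PySem.Set.add col key else col) PySem.Set.empty
    if collection = [] then layers
    else pvLayersLoopA connections required fuel (layers ++ [collection]) (PySem.Set.union checked collection)

def feed_forward_layers (inputs : List Int) (outputs : List Int) (connections : List (Int × Int)) : List (List Int) :=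
  let required := pvReqLoopA inputs connections (connections.length + 1) (PySem.Set.ofList outputs) (PySem.Set.ofList outputs)
  pvLayersLoopA connections required (connections.length + 1) [] (PySem.Set.ofList inputs)

-- ===== PORT B =====
def pvBuildPreds (connections : List (Int × Int)) : PySem.Dict Int (List Int) :=
  connections.foldl (fun d p => d.modify p.2 [] (fun l => l ++ [p.1])) PySem.Dict.empty

def pvReqLoopB (inputs : List Int) (preds : PySem.Dict Int (List Int)) : Nat → PySem.Set Int → PySem.Set Int → List Int → PySem.Set Int
  | 0, required, _, _ => required
  | fuel+1, required, checked, frontier =>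
    let newer : PySem.Set Int :=
      frontier.foldl (fun s b => (preds.getD b []).foldl (fun s a => if a ∈ checked then s else PySem.Set.add s a) s) PySem.Set.empty
    if newer = [] then required
    else
      let fresh : PySem.Set Int := PySem.Set.ofList (newer.filter (fun x => decide (x ∉ inputs)))
      if fresh = [] then required
      else pvReqLoopB inputs preds fuel (PySem.Set.union required fresh) (PySem.Set.union checked newer) newer

def pvLayersLoopB (connections : List (Int × Int)) (preds : PySem.Dict Int (List Int)) (required : PySem.Set Int) : Nat → List (List Int) → PySem.Set Int → List (List Int)
  | 0, layers, _ => layers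
  | fuel+1, layers, checked =>
    let layer : List Int :=
      connections.foldl (fun acc p =>
        if p.1 ∈ checked ∧ p.2 ∉ checked then
          (if p.2 ∉ acc ∧ p.2 ∈ required ∧ ((preds.getD p.2 []).all (fun a => decide (a ∈ checked))) = true
           then acc ++ [p.2] else acc)
        else acc) []
    if layer = [] then layers
    else pvLayersLoopB connections preds required fuel (layers ++ [PySem.Set.ofList layer]) (PySem.Set.update checked layer)

def feed_forward_layers_alt (inputs : List Int) (outputs : List Int) (connections : List (Int × Int)) : List (List Int) :=
  let preds := pvBuildPreds connections
  let required := pvReqLoopB inputs preds (connections.length + 1) (PySem.Set.ofList outputs) (PySem.Set.ofList outputs) outputs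
  pvLayersLoopB connections preds required (connections.length + 1) [] (PySem.Set.ofList inputs)

-- ===== PRECONDITION & SPEC =====
def Spec_feed_forward_layers (inputs : List Int) (outputs : List Int) (connections : List (Int × Int)) (out : List (List Int)) : Prop := out = feed_forward_layers_alt inputs outputs connections
instance (inputs : List Int) (outputs : List Int) (connections : List (Int × Int)) (out : List (List Int)) : Decidable (Spec_feed_forward_layers inputs outputs connections out) := by unfold Spec_feed_forward_layers; infer_instance

-- ===== CLAIM =====
def Claim_equal_feed_forward_layers : Prop := ∀ (inputs : List Int) (outputs : List Int) (connections : List (Int × Int)), Dom_feed_forward_layers inputs outputs connections → Spec_feed_forward_layers inputs outputs connections (feed_forward_layers inputs outputs connections)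

-- ===== LEMMAS AND PROOFS =====

-- membership in the predecessor dict = membership as a connection
theorem pvMemPredsFold (connections : List (Int × Int)) (d : PySem.Dict Int (List Int)) (a b : Int) :
    a ∈ (connections.foldl (fun d p => d.modify p.2 [] (fun l => l ++ [p.1])) d).getD b [] ↔
      a ∈ d.getD b [] ∨ (a, b) ∈ connections := by
  induction connections generalizing d with
  | nil => simp
  | cons p t ih =>
    obtain ⟨pa, pb⟩ := p
    simp only [List.foldl_cons, ih, PySem.Dict.getD_modify, List.mem_cons]
    by_cases h : b = pb
    · subst h
      simp only [if_pos rfl, List.mem_append, List.mem_singleton, Prod.mk.injEq,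
        if_true, and_true]
      tauto
    · simp only [if_neg h, Prod.mk.injEq]
      constructor
      · rintro (h' | h')
        · exact Or.inl h'
        · exact Or.inr (Or.inr h')
      · rintro (h' | ⟨_, h2⟩ | h')
        · exact Or.inl h'
        · exact absurd h2 h
        · exact Or.inr h'

theorem pvMemPreds (connections : List (Int × Int)) (a b : Int) :
    a ∈ (pvBuildPreds connections).getD b [] ↔ (a, b) ∈ connections := by
  unfold pvBuildPreds
  rw [pvMemPredsFold]
  simp

-- membership in the inner conditional-add fold of pvReqLoopB
theorem pvMemInnerFold (l : List Int) (checked : PySem.Set Int) (s : PySem.Set Int) (x : Int) :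
    x ∈ l.foldl (fun s a => if a ∈ checked then s else PySem.Set.add s a) s ↔
      x ∈ s ∨ (x ∈ l ∧ x ∉ checked) := by
  induction l generalizing s with
  | nil => simp
  | cons a t ih =>
    simp only [List.foldl_cons, ih]
    by_cases h : a ∈ checked
    · rw [if_pos h]
      constructor
      · rintro (h' | h'); · exact Or.inl h'
        · exact Or.inr ⟨List.mem_cons_of_mem _ h'.1, h'.2⟩
      · rintro (h' | ⟨h1, h2⟩); · exact Or.inl h'
        · rcases List.mem_cons.mp h1 with h1 | h1
          · exact absurd (h1 ▸ h) h2
          · exact Or.inr ⟨h1, h2⟩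
    · rw [if_neg h]
      simp only [PySem.Set.mem_add]
      constructor
      · rintro ((h' | h') | h')
        · exact Or.inl h'
        · exact Or.inr ⟨h' ▸ List.mem_cons_self .., h' ▸ h⟩
        · exact Or.inr ⟨List.mem_cons_of_mem _ h'.1, h'.2⟩
      · rintro (h' | ⟨h1, h2⟩)
        · exact Or.inl (Or.inl h')
        · rcases List.mem_cons.mp h1 with h1 | h1
          · exact Or.inl (Or.inr h1)
          · exact Or.inr ⟨h1, h2⟩

-- membership in `newer` of pvReqLoopB
theorem pvMemNewer (frontier : List Int) (preds : PySem.Dict Int (List Int)) (checked : PySem.Set Int) (s : PySem.Set Int) (x : Int) :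
    x ∈ frontier.foldl (fun s b => (preds.getD b []).foldl (fun s a => if a ∈ checked then s else PySem.Set.add s a) s) s ↔
      x ∈ s ∨ ∃ b ∈ frontier, x ∈ preds.getD b [] ∧ x ∉ checked := by
  induction frontier generalizing s with
  | nil => simp
  | cons b t ih =>
    simp only [List.foldl_cons, ih, pvMemInnerFold]
    constructor
    · rintro ((h | h) | ⟨c, hc, h⟩)
      · exact Or.inl h
      · exact Or.inr ⟨b, List.mem_cons_self .., h⟩
      · exact Or.inr ⟨c, List.mem_cons_of_mem _ hc, h⟩
    · rintro (h | ⟨c, hc, h⟩)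
      · exact Or.inl (Or.inl h)
      · rcases List.mem_cons.mp hc with hc | hc
        · exact Or.inl (Or.inr (hc ▸ h))
        · exact Or.inr ⟨c, hc, h⟩

-- first-occurrence dedup against a `seen` list (proof-only device)
def pvDD (l : List Int) (seen : List Int) : List Int :=
  match l with
  | [] => []
  | b :: t => if b ∈ seen then pvDD t seen else b :: pvDD t (seen ++ [b])

theorem pvUpdate_eq_dd (l : List Int) (seen : PySem.Set Int) :
    PySem.Set.update seen l = seen ++ pvDD l seen := by
  induction l generalizing seen with
  | nil => simp [PySem.Set.update, pvDD]
  | cons b t ih =>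
    simp only [PySem.Set.update, List.foldl_cons, pvDD]
    by_cases h : b ∈ seen
    · rw [if_pos h, PySem.Set.add_of_mem h]
      exact ih seen
    · rw [if_neg h, PySem.Set.add_of_not_mem h]
      simpa using ih (seen ++ [b])

theorem pvOfList_eq_dd (l : List Int) : PySem.Set.ofList l = pvDD l [] := by
  have := pvUpdate_eq_dd l PySem.Set.empty
  simpa [PySem.Set.update, PySem.Set.ofList, PySem.Set.empty] using this

-- A's collection loop: fold of conditional Set.add over a nodup list is append of a filter
theorem pvCollectFold (P : Int → Prop) [DecidablePred P] (ks : List Int) (s : PySem.Set Int) :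
    ks.Nodup → (∀ k ∈ ks, k ∉ s) →
    ks.foldl (fun col key => if P key then PySem.Set.add col key else col) s
      = s ++ ks.filter (fun k => decide (P k)) := by
  induction ks generalizing s with
  | nil => simp
  | cons k t ih =>
    intro hnd hfresh
    simp only [List.foldl_cons, List.filter_cons]
    by_cases h : P k
    · rw [if_pos h, PySem.Set.add_of_not_mem (hfresh k (List.mem_cons_self ..))]
      rw [if_pos (by simpa using h)]
      rw [ih (s ++ [k]) (List.Nodup.of_cons hnd) ?_]
      · simp
      · intro k' hk'
        simp only [List.mem_append, List.mem_singleton]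
        rintro (h' | h')
        · exact hfresh k' (List.mem_cons_of_mem _ hk') h'
        · exact (List.nodup_cons.mp hnd).1 (h' ▸ hk')
    · rw [if_neg h, if_neg (by simpa using h)]
      exact ih s (List.Nodup.of_cons hnd) (fun k' hk' => hfresh k' (List.mem_cons_of_mem _ hk'))

-- B's one-pass layer loop: fold with "not yet placed ∧ P" equals filter of first-occurrence dedup
theorem pvOnePassFold (P : Int → Prop) [DecidablePred P] (m : List Int) (seen acc : List Int) :
    (∀ b, P b → (b ∈ acc ↔ b ∈ seen)) →
    m.foldl (fun acc b => if b ∉ acc ∧ P b then acc ++ [b] else acc) acc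
      = acc ++ (pvDD m seen).filter (fun b => decide (P b)) := by
  induction m generalizing seen acc with
  | nil => simp [pvDD]
  | cons b t ih =>
    intro H
    simp only [List.foldl_cons, pvDD]
    by_cases hs : b ∈ seen
    · rw [if_pos hs]
      by_cases hP : P b
      · rw [if_neg (by simp [(H b hP).mpr hs])]
        exact ih seen acc H
      · rw [if_neg (by simp [hP])]
        exact ih seen acc H
    · rw [if_neg hs]
      by_cases hP : P b
      · rw [if_pos ⟨fun hb => hs ((H b hP).mp hb), hP⟩]
        rw [ih (seen ++ [b]) (acc ++ [b]) ?_]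
        · simp [hP]
        · intro c hc
          simp only [List.mem_append, List.mem_singleton, H c hc]
      · rw [if_neg (by simp [hP])]
        rw [ih (seen ++ [b]) acc ?_]
        · simp [hP]
        · intro c hc
          have : c ≠ b := fun h => hP (h ▸ hc)
          simp [H c hc, this]

-- gate/step fusion: a fold over connections with an outer gate is a fold over the gated targets
theorem pvGateFuse {β : Type} (G : Int × Int → Prop) [DecidablePred G]
    (step : β → Int → β) (l : List (Int × Int)) (acc : β) :
    l.foldl (fun acc p => if G p then step acc p.2 else acc) acc
      = ((l.filter (fun p => decide (G p))).map Prod.snd).foldl step acc := by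
  induction l generalizing acc with
  | nil => simp
  | cons p t ih =>
    simp only [List.foldl_cons, List.filter_cons]
    by_cases h : G p
    · rw [if_pos h, if_pos (by simpa using h)]
      simp [ih]
    · rw [if_neg h, if_neg (by simpa using h)]
      exact ih acc

-- the two layer loops agree when the two `required` sets have the same members
theorem pvLayersEq (connections : List (Int × Int)) (reqA reqB : PySem.Set Int)
    (hreq : ∀ x, x ∈ reqA ↔ x ∈ reqB) :
    ∀ (fuel : Nat) (layers : List (List Int)) (checked : PySem.Set Int), checked.Nodup →
    pvLayersLoopA connections reqA fuel layers checked
      = pvLayersLoopB connections (pvBuildPreds connections) reqB fuel layers checked := by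
  intro fuel
  induction fuel with
  | zero => intro layers checked _; rfl
  | succ n ih =>
    intro layers checked hnd
    simp only [pvLayersLoopA, pvLayersLoopB]
    set l := ((connections.filter (fun p => decide (p.1 ∈ checked) && decide (p.2 ∉ checked))).map Prod.snd) with hl
    have hPiff : ∀ key : Int,
        (key ∈ reqA ∧ ((connections.filter (fun p => p.2 == key)).all (fun p => decide (p.1 ∈ checked))) = true)
          ↔ (key ∈ reqB ∧ (((pvBuildPreds connections).getD key []).all (fun a => decide (a ∈ checked))) = true) := by
      intro key
      rw [hreq key]
      have h1 : ((connections.filter (fun p => p.2 == key)).all (fun p => decide (p.1 ∈ checked))) = true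
          ↔ ∀ p ∈ connections, p.2 = key → p.1 ∈ checked := by
        rw [List.all_eq_true]
        constructor
        · intro h p hp hpk
          simpa using h p (List.mem_filter.mpr ⟨hp, by simpa using hpk⟩)
        · intro h p hp
          obtain ⟨h1', h2'⟩ := List.mem_filter.mp hp
          simpa using h p h1' (by simpa using h2')
      have h2 : (((pvBuildPreds connections).getD key []).all (fun a => decide (a ∈ checked))) = true
          ↔ ∀ p ∈ connections, p.2 = key → p.1 ∈ checked := by
        simp only [List.all_eq_true, decide_eq_true_eq]
        constructor
        · intro h p hp hpk
          have hm : (p.1, key) ∈ connections := by rw [← hpk]; exact hp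
          exact h p.1 ((pvMemPreds connections p.1 key).mpr hm)
        · intro h a ha
          exact h (a, key) ((pvMemPreds connections a key).mp ha) rfl
      rw [h1, h2]
    -- A's collection equals the filtered first-occurrence dedup of l
    have hcoll :
        (PySem.Set.ofList l).foldl (fun col key =>
          if key ∈ reqA ∧ ((connections.filter (fun p => p.2 == key)).all (fun p => decide (p.1 ∈ checked))) = true
          then PySem.Set.add col key else col) PySem.Set.empty
        = (pvDD l []).filter (fun k => decide (k ∈ reqA ∧ ((connections.filter (fun p => p.2 == k)).all (fun p => decide (p.1 ∈ checked))) = true)) := by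
      rw [pvCollectFold _ _ _ (PySem.Set.nodup_ofList l) (by intro k _; simp [PySem.Set.empty])]
      rw [pvOfList_eq_dd]
      rfl
    -- B's layer equals the same list
    have hlayer :
        connections.foldl (fun acc p =>
          if p.1 ∈ checked ∧ p.2 ∉ checked then
            (if p.2 ∉ acc ∧ p.2 ∈ reqB ∧ (((pvBuildPreds connections).getD p.2 []).all (fun a => decide (a ∈ checked))) = true
             then acc ++ [p.2] else acc)
          else acc) []
        = (pvDD l []).filter (fun k => decide (k ∈ reqA ∧ ((connections.filter (fun p => p.2 == k)).all (fun p => decide (p.1 ∈ checked))) = true)) := by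
      rw [pvGateFuse (fun p => p.1 ∈ checked ∧ p.2 ∉ checked)
        (fun acc b => if b ∉ acc ∧ b ∈ reqB ∧ (((pvBuildPreds connections).getD b []).all (fun a => decide (a ∈ checked))) = true then acc ++ [b] else acc) connections []]
      have hfilt : (connections.filter (fun p => decide (p.1 ∈ checked ∧ p.2 ∉ checked)))
          = connections.filter (fun p => decide (p.1 ∈ checked) && decide (p.2 ∉ checked)) := by
        apply List.filter_congr
        intro p _
        by_cases h1 : p.1 ∈ checked <;> by_cases h2 : p.2 ∈ checked <;> simp [h1, h2]
      rw [hfilt, ← hl]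
      rw [pvOnePassFold (fun b => b ∈ reqB ∧ (((pvBuildPreds connections).getD b []).all (fun a => decide (a ∈ checked))) = true) l [] [] (by intro b _; simp)]
      simp only [List.nil_append]
      apply List.filter_congr
      intro k _
      exact decide_eq_decide.mpr (hPiff k).symm
    rw [hcoll, hlayer]
    set L := (pvDD l []).filter (fun k => decide (k ∈ reqA ∧ ((connections.filter (fun p => p.2 == k)).all (fun p => decide (p.1 ∈ checked))) = true)) with hL
    by_cases hemp : L = []
    · rw [if_pos hemp, if_pos hemp]
    · rw [if_neg hemp, if_neg hemp]
      have hndL : L.Nodup := by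
        rw [hL]
        exact List.Nodup.filter _ (by rw [← pvOfList_eq_dd]; exact PySem.Set.nodup_ofList l)
      rw [PySem.Set.ofList_eq_self_of_nodup L hndL]
      have hun : PySem.Set.union checked L = PySem.Set.update checked L := rfl
      rw [hun]
      exact ih (layers ++ [L]) (PySem.Set.update checked L) (PySem.Set.nodup_update checked L hnd)

-- the two required loops produce member-equal sets
theorem pvReqEq (inputs : List Int) (connections : List (Int × Int)) :
    ∀ (fuel : Nat) (reqA ckA reqB ckB : PySem.Set Int) (frontier : List Int),
    (∀ x, x ∈ reqA ↔ x ∈ reqB) → (∀ x, x ∈ ckA ↔ x ∈ ckB) →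
    (∀ b ∈ frontier, b ∈ ckB) →
    (∀ b ∈ ckB, b ∉ frontier → ∀ p ∈ connections, p.2 = b → p.1 ∈ ckB) →
    ∀ x, x ∈ pvReqLoopA inputs connections fuel reqA ckA
      ↔ x ∈ pvReqLoopB inputs (pvBuildPreds connections) fuel reqB ckB frontier := by
  intro fuel
  induction fuel with
  | zero => intro reqA ckA reqB ckB frontier hreq _ _ _ x; exact hreq x
  | succ n ih =>
    intro reqA ckA reqB ckB frontier hreq hck hfr hinv x
    simp only [pvReqLoopA, pvReqLoopB]
    set chkA : PySem.Set Int :=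
      PySem.Set.ofList ((connections.filter (fun p => decide (p.2 ∈ ckA) && decide (p.1 ∉ ckA))).map Prod.fst) with hchkA
    set nwB : PySem.Set Int :=
      frontier.foldl (fun s b => (((pvBuildPreds connections).getD b []).foldl (fun s a => if a ∈ ckB then s else PySem.Set.add s a) s)) PySem.Set.empty with hnwB
    have hAmem : ∀ y, y ∈ chkA ↔ ∃ p ∈ connections, p.1 = y ∧ p.2 ∈ ckA ∧ p.1 ∉ ckA := by
      intro y
      rw [hchkA, PySem.Set.mem_ofList]
      simp only [List.mem_map, List.mem_filter, Bool.and_eq_true, decide_eq_true_eq]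
      constructor
      · rintro ⟨p, ⟨hp, h1, h2⟩, h3⟩
        exact ⟨p, hp, h3, h1, h2⟩
      · rintro ⟨p, hp, h1, h2, h3⟩
        exact ⟨p, ⟨hp, h2, h3⟩, h1⟩
    have hBmem : ∀ y, y ∈ nwB ↔ ∃ b ∈ frontier, (y, b) ∈ connections ∧ y ∉ ckB := by
      intro y
      rw [hnwB, pvMemNewer]
      simp only [PySem.Set.empty, List.not_mem_nil, false_or, pvMemPreds]
    have hchk : ∀ y, y ∈ chkA ↔ y ∈ nwB := by
      intro y
      rw [hAmem, hBmem]
      constructor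
      · rintro ⟨p, hp, rfl, h2, h3⟩
        have hyB : p.1 ∉ ckB := fun h => h3 ((hck p.1).mpr h)
        by_cases hb : p.2 ∈ frontier
        · exact ⟨p.2, hb, by simpa using hp, hyB⟩
        · exact absurd (hinv p.2 ((hck p.2).mp h2) hb p hp rfl) hyB
      · rintro ⟨b, hb, h1, h2⟩
        have hbck : b ∈ ckA := (hck b).mpr (hfr b hb)
        exact ⟨(y, b), h1, rfl, hbck, fun h => h2 ((hck y).mp h)⟩
    have hempty : chkA = [] ↔ nwB = [] := by
      rw [List.eq_nil_iff_forall_not_mem, List.eq_nil_iff_forall_not_mem]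
      exact ⟨fun h y hy => h y ((hchk y).mpr hy), fun h y hy => h y ((hchk y).mp hy)⟩
    by_cases hA : chkA = []
    · rw [if_pos hA, if_pos (hempty.mp hA)]
      exact hreq x
    · rw [if_neg hA, if_neg (fun h => hA (hempty.mpr h))]
      set frA : PySem.Set Int := PySem.Set.ofList (chkA.filter (fun x => decide (x ∉ inputs))) with hfrA
      set frB : PySem.Set Int := PySem.Set.ofList (nwB.filter (fun x => decide (x ∉ inputs))) with hfrB
      have hfrmem : ∀ y, y ∈ frA ↔ y ∈ frB := by
        intro y
        rw [hfrA, hfrB, PySem.Set.mem_ofList, PySem.Set.mem_ofList]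
        simp only [List.mem_filter, decide_eq_true_eq]
        rw [hchk y]
      have hfrempty : frA = [] ↔ frB = [] := by
        rw [List.eq_nil_iff_forall_not_mem, List.eq_nil_iff_forall_not_mem]
        exact ⟨fun h y hy => h y ((hfrmem y).mpr hy), fun h y hy => h y ((hfrmem y).mp hy)⟩
      by_cases hfA : frA = []
      · rw [if_pos hfA, if_pos (hfrempty.mp hfA)]
        exact hreq x
      · rw [if_neg hfA, if_neg (fun h => hfA (hfrempty.mpr h))]
        apply ih
        · intro y
          simp only [PySem.Set.mem_union]
          rw [hreq y, hfrmem y]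
        · intro y
          simp only [PySem.Set.mem_union]
          rw [hck y, hchk y]
        · intro b hb
          simp only [PySem.Set.mem_union]
          exact Or.inr hb
        · intro b hb hnb p hp hpb
          simp only [PySem.Set.mem_union] at hb ⊢
          rcases hb with hb | hb
          · by_cases hbf : b ∈ frontier
            · by_cases hpc : p.1 ∈ ckB
              · exact Or.inl hpc
              · refine Or.inr ((hBmem p.1).mpr ⟨b, hbf, ?_, hpc⟩)
                rw [← hpb]
                exact hp
            · exact Or.inl (hinv b hb hbf p hp hpb)
          · exact absurd hb hnb

-- ===== VERDICT =====
theorem feed_forward_layers_spec : Claim_equal_feed_forward_layers := by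
  intro inputs outputs connections _
  unfold Spec_feed_forward_layers feed_forward_layers feed_forward_layers_alt
  apply pvLayersEq connections _ _ ?_ _ _ _ (PySem.Set.nodup_ofList inputs)
  apply pvReqEq inputs connections (connections.length + 1) _ _ _ _ outputs
    (fun _ => Iff.rfl) (fun _ => Iff.rfl)
  · intro b hb
    simpa using hb
  · intro b hb hnb _ _ _
    exact absurd (show b ∈ outputs by simpa using hb) hnb
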